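-- pv_equiv track=rewrite | github.com/codeAligned/python-learning | checkio/berserk rock.py | berserk_rook
-- ===== SOURCE A (Python) =====
-- def find(rock,enemy):
-- 	captured = []
-- 	for i in enemy:
-- 		if rock[0] == i[0] or rock[1] == i[1]:
-- 			#enemy.remove(i)
-- 			captured.append(i)
-- 	return captured
--
-- def berserk_rook(berserker, enemies):
-- 	connected_enemies = find(berserker, enemies)
-- 	if not connected_enemies:
-- 		return 0
-- 	new_status = [(i, [j for j in enemies if j != i]) for i in connected_enemies]
-- 	aaa = [berserk_rook(*i) for i in new_status]
-- 	result = max(aaa)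
-- 	return 1 + result
-- ===== SOURCE B (Python) =====
-- def berserk_rook(berserker, enemies):
--     # Memoized search over (position, frozenset of remaining enemies) states.
--     memo = {}
--
--     def go(pos, rem):
--         key = (pos, rem)
--         if key in memo:
--             return memo[key]
--         best = -1
--         for e in rem:
--             if pos[0] == e[0] or pos[1] == e[1]:
--                 v = go((e[0], e[1]), rem - {e})
--                 if v > best:
--                     best = v
--         memo[key] = best + 1
--         return best + 1
--
--     return go(tuple(berserker[:2]), frozenset(tuple(e) for e in enemies))
-- ===== Notes on version B (the rewrite author's own statement) =====
-- stated objective: faster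
-- what changed: B replaces A's factorial-time tree recursion (re-scanning and re-filtering the enemy list in every branch) by a memoized depth-first search over (position, frozenset of remaining enemies) states, so each reachable state is solved once.
-- outside the precondition, e.g. on berserk_rook((1,), [(1, 2)]): A returns 1, B returns 1; on berserk_rook((0, 3), [(0,)]): A returns 1, B raises IndexError
import Mathlib
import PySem

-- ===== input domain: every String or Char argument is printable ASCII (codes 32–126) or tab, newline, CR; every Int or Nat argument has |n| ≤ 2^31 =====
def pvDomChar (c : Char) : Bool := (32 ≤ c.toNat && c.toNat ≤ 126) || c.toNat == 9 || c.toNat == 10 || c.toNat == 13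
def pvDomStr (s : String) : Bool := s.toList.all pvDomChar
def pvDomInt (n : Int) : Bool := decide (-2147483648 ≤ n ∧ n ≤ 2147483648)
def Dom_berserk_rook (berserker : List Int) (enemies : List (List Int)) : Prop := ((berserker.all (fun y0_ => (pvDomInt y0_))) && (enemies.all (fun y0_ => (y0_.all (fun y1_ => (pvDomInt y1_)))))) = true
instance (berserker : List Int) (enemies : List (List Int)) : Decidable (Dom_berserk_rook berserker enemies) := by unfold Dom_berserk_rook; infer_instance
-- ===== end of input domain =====

-- B replaces A's factorial tree recursion by a memoized search over (position, set of
-- remaining enemies) states (objective: faster, asymptotic). Equality proved on Pre_.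

-- ===== PORT A =====
-- find(rock, enemy): the enemies sharing a row or column with rock (indexing via pyGetD,
-- exact under Pre_, where every tuple has ≥ 2 coordinates)
def findA (rock : List Int) (enemy : List (List Int)) : List (List Int) :=
  enemy.foldl
    (fun captured i =>
      if PySem.List.pyGetD rock 0 0 == PySem.List.pyGetD i 0 0 || PySem.List.pyGetD rock 1 0 == PySem.List.pyGetD i 1 0
      then captured ++ [i] else captured) []

lemma mem_of_mem_findA {rock : List Int} {enemy : List (List Int)} {i : List Int}
    (h : i ∈ findA rock enemy) : i ∈ enemy := by
  unfold findA at h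
  rw [PySem.List.foldl_append_if
    (p := fun i => PySem.List.pyGetD rock 0 0 == PySem.List.pyGetD i 0 0 || PySem.List.pyGetD rock 1 0 == PySem.List.pyGetD i 1 0)
    (f := fun i => i)] at h
  simp only [List.nil_append, List.mem_map, List.mem_filter] at h
  obtain ⟨j, ⟨hj, _⟩, rfl⟩ := h
  exact hj

lemma filter_ne_length_lt {i : List Int} {enemies : List (List Int)} (h : i ∈ enemies) :
    (enemies.filter (fun j => j != i)).length < enemies.length := by
  apply List.length_filter_lt_length_iff_exists.mpr
  exact ⟨i, h, by simp⟩

def berserk_rook (berserker : List Int) (enemies : List (List Int)) : Int :=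
  let connected := findA berserker enemies
  if connected = [] then 0
  else
    let aaa := connected.attach.map
      (fun i => berserk_rook i.1 (enemies.filter (fun j => j != i.1)))
    1 + ((PySem.List.max? aaa (fun x => x)).getD 0)
termination_by enemies.length
decreasing_by simpa using filter_ne_length_lt (mem_of_mem_findA i.2)

-- ===== PORT B =====
-- go(pos, rem) of Source B with the memo dict threaded explicitly; `fuel` is only a
-- structural-termination guard (enemies.length + 1 always suffices, proved below)
-- the body of Source B's `for e in rem` loop, abstracted over the recursive call `rec`
-- (structural on todo; `rec` is instantiated with goB at the next fuel level below)
def goLoop (rec : (Int × Int) → List (List Int) →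
      PySem.Dict ((Int × Int) × List (List Int)) Int →
      Int × PySem.Dict ((Int × Int) × List (List Int)) Int)
    (pos : Int × Int) (rem : List (List Int))
    (todo : List (List Int)) (best : Int)
    (memo : PySem.Dict ((Int × Int) × List (List Int)) Int) :
    Int × PySem.Dict ((Int × Int) × List (List Int)) Int :=
  match todo with
  | [] => (best, memo)
  | e :: t =>
    if pos.1 == PySem.List.pyGetD e 0 0 || pos.2 == PySem.List.pyGetD e 1 0 then
      let r := rec (PySem.List.pyGetD e 0 0, PySem.List.pyGetD e 1 0) (PySem.Set.diff rem [e]) memo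
      goLoop rec pos rem t (if r.1 > best then r.1 else best) r.2
    else
      goLoop rec pos rem t best memo

-- go(pos, rem) of Source B with the memo dict threaded explicitly; `fuel` is only a
-- structural-termination guard (enemies.length + 1 always suffices, proved below)
def goB (fuel : Nat) (pos : Int × Int) (rem : List (List Int))
    (memo : PySem.Dict ((Int × Int) × List (List Int)) Int) :
    Int × PySem.Dict ((Int × Int) × List (List Int)) Int :=
  match fuel with
  | 0 => (0, memo)
  | Nat.succ f =>
    match memo.get? (pos, rem) with
    | some v => (v, memo)
    | none =>
      let r := goLoop (fun p rm m => goB f p rm m) pos rem rem (-1) memo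
      (r.1 + 1, r.2.insert (pos, rem) (r.1 + 1))

def berserk_rook_alt (berserker : List Int) (enemies : List (List Int)) : Int :=
  (goB (enemies.length + 1)
    (PySem.List.pyGetD berserker 0 0, PySem.List.pyGetD berserker 1 0)
    (PySem.Set.ofList enemies) PySem.Dict.empty).1

-- ===== PRECONDITION & SPEC =====
-- Pre_ excludes inputs where berserker or some enemy has fewer than 2 coordinates (unless
-- enemies is empty): there Python A usually raises IndexError, returning only when every
-- short tuple happens to match on coordinate 0, and Python B's recursion raises as well.
def Pre_berserk_rook (berserker : List Int) (enemies : List (List Int)) : Prop :=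
  enemies = [] ∨ (2 ≤ berserker.length ∧ ∀ e ∈ enemies, 2 ≤ e.length)
instance (berserker : List Int) (enemies : List (List Int)) : Decidable (Pre_berserk_rook berserker enemies) := by unfold Pre_berserk_rook; infer_instance

def pvWitness_berserk_rook : List Int × List (List Int) := ([0, 1], [[0, 5], [3, 1], [7, 8]])

def Spec_berserk_rook (berserker : List Int) (enemies : List (List Int)) (out : Int) : Prop := out = berserk_rook_alt berserker enemies
instance (berserker : List Int) (enemies : List (List Int)) (out : Int) : Decidable (Spec_berserk_rook berserker enemies out) := by unfold Spec_berserk_rook; infer_instance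

-- ===== CLAIM (what is proved, stated in full; the proofs are below) =====
def Claim_equal_berserk_rook : Prop := ∀ (berserker : List Int) (enemies : List (List Int)), Dom_berserk_rook berserker enemies → Pre_berserk_rook berserker enemies → Spec_berserk_rook berserker enemies (berserk_rook berserker enemies)

-- ===== LEMMAS AND PROOFS =====

-- the shared capture test: pos is aligned with enemy e
def capb (pos : Int × Int) (e : List Int) : Bool :=
  pos.1 == PySem.List.pyGetD e 0 0 || pos.2 == PySem.List.pyGetD e 1 0

-- reference function: plain (unmemoized) recursion on (position, remaining-enemies list)
def g (pos : Int × Int) (rem : List (List Int)) : Int :=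
  1 + rem.attach.foldl
      (fun best e =>
        if capb pos e.1
        then max best (g (PySem.List.pyGetD e.1 0 0, PySem.List.pyGetD e.1 1 0) (rem.filter (fun j => j != e.1)))
        else best) (-1)
termination_by rem.length
decreasing_by simpa using filter_ne_length_lt e.2

-- the per-enemy value in g's running max
def gF (rem : List (List Int)) (e : List Int) : Int :=
  g (PySem.List.pyGetD e 0 0, PySem.List.pyGetD e 1 0) (rem.filter (fun j => j != e))

lemma g_unfold (pos : Int × Int) (rem : List (List Int)) :
    g pos rem = 1 + ((rem.filter (capb pos)).map (gF rem)).foldl max (-1) := by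
  rw [g]
  rw [show rem.attach.foldl
      (fun best e =>
        if capb pos e.1
        then max best (g (PySem.List.pyGetD e.1 0 0, PySem.List.pyGetD e.1 1 0) (rem.filter (fun j => j != e.1)))
        else best) (-1)
    = rem.foldl (fun best e => if capb pos e then max best (gF rem e) else best) (-1)
    from List.foldl_attach (l := rem)
      (f := fun best e => if capb pos e then max best (gF rem e) else best) (b := -1)]
  rw [PySem.List.foldl_if_eq_foldl_filter (p := capb pos)
    (f := fun best e => max best (gF rem e))]
  rw [List.foldl_map]

lemma g_nonneg (pos : Int × Int) (rem : List (List Int)) : 0 ≤ g pos rem := by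
  rw [g_unfold]
  have h := (PySem.List.le_foldl_max (((rem.filter (capb pos)).map (gF rem))) (-1)).1
  omega

-- a running max over a list of values depends only on which values occur
lemma foldl_max_eq_of_mem_iff (b : Int) (xs ys : List Int)
    (h : ∀ x, x ∈ xs ↔ x ∈ ys) : xs.foldl max b = ys.foldl max b := by
  apply le_antisymm
  · rcases PySem.List.foldl_max_mem xs b with he | he
    · rw [he]; exact (PySem.List.le_foldl_max ys b).1
    · exact (PySem.List.le_foldl_max ys b).2 _ ((h _).mp he)
  · rcases PySem.List.foldl_max_mem ys b with he | he
    · rw [he]; exact (PySem.List.le_foldl_max xs b).1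
    · exact (PySem.List.le_foldl_max xs b).2 _ ((h _).mpr he)

lemma g_congr_aux : ∀ (n : Nat) (l l' : List (List Int)), l.length + l'.length ≤ n →
    (∀ x, x ∈ l ↔ x ∈ l') → ∀ pos, g pos l = g pos l' := by
  intro n
  induction n with
  | zero =>
    intro l l' hn hm pos
    have : l = [] := by cases l <;> simp_all
    have : l' = [] := by cases l' <;> simp_all
    subst_vars; rfl
  | succ n ih =>
    intro l l' hn hm pos
    rw [g_unfold, g_unfold]
    congr 1
    apply foldl_max_eq_of_mem_iff
    intro x
    simp only [List.mem_map, List.mem_filter]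
    constructor
    · rintro ⟨e, ⟨hel, hc⟩, rfl⟩
      refine ⟨e, ⟨(hm e).mp hel, hc⟩, ?_⟩
      unfold gF
      apply ih
      · have h1 := filter_ne_length_lt (i := e) (enemies := l') ((hm e).mp hel)
        have h2 := filter_ne_length_lt (i := e) (enemies := l) hel
        omega
      · intro y; simp only [List.mem_filter]
        exact and_congr_left' ((hm y).symm)
    · rintro ⟨e, ⟨hel, hc⟩, rfl⟩
      refine ⟨e, ⟨(hm e).mpr hel, hc⟩, ?_⟩
      unfold gF
      apply ih
      · have h1 := filter_ne_length_lt (i := e) (enemies := l') hel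
        have h2 := filter_ne_length_lt (i := e) (enemies := l) ((hm e).mpr hel)
        omega
      · intro y; simp only [List.mem_filter]
        exact and_congr_left' (hm y)

lemma g_congr {l l' : List (List Int)} (pos : Int × Int)
    (h : ∀ x, x ∈ l ↔ x ∈ l') : g pos l = g pos l' :=
  g_congr_aux (l.length + l'.length) l l' le_rfl h pos

lemma findA_eq (rock : List Int) (enemy : List (List Int)) :
    findA rock enemy
      = enemy.filter (capb (PySem.List.pyGetD rock 0 0, PySem.List.pyGetD rock 1 0)) := by
  unfold findA
  rw [PySem.List.foldl_append_if
    (p := fun i => PySem.List.pyGetD rock 0 0 == PySem.List.pyGetD i 0 0 || PySem.List.pyGetD rock 1 0 == PySem.List.pyGetD i 1 0)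
    (f := fun i => i)]
  simp only [List.nil_append, List.map_id_fun', id_eq]
  apply List.filter_congr
  intro a _
  rfl

lemma A_eq_g_aux : ∀ (n : Nat) (enemies : List (List Int)) (rock : List Int), enemies.length ≤ n →
    berserk_rook rock enemies = g (PySem.List.pyGetD rock 0 0, PySem.List.pyGetD rock 1 0) enemies := by
  intro n
  induction n with
  | zero =>
    intro enemies rock hn
    have : enemies = [] := by cases enemies <;> simp_all
    subst this
    rw [berserk_rook, g_unfold]
    simp [findA_eq]
  | succ n ih =>
    intro enemies rock hn
    rw [berserk_rook]
    set pos := (PySem.List.pyGetD rock 0 0, PySem.List.pyGetD rock 1 0) with hpos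
    have hmap :
        (findA rock enemies).attach.map
            (fun i => berserk_rook i.1 (enemies.filter (fun j => j != i.1)))
          = (enemies.filter (capb pos)).map (gF enemies) := by
      rw [List.attach_map_val
        (l := findA rock enemies)
        (f := fun i => berserk_rook i (enemies.filter (fun j => j != i)))]
      rw [findA_eq]
      apply List.map_congr_left
      intro e he
      have hel : e ∈ enemies := (List.mem_filter.mp he).1
      have hlen := filter_ne_length_lt hel
      rw [ih (enemies.filter (fun j => j != e)) e (by omega)]
      rfl
    rw [findA_eq, hpos] at hmap ⊢
    by_cases hfe : enemies.filter (capb pos) = []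
    · rw [if_pos hfe, g_unfold, hfe]
      simp
    · rw [if_neg hfe]
      rw [hmap]
      rcases hl : (enemies.filter (capb pos)).map (gF enemies) with _ | ⟨x, t⟩
      · exact absurd (List.map_eq_nil_iff.mp hl) hfe
      · show 1 + (PySem.List.max? (x :: t) fun x => x).getD 0 = g pos enemies
        rw [PySem.List.max?_id_cons, g_unfold, hl]
        simp only [Option.getD_some, List.foldl_cons]
        have hx : 0 ≤ x := by
          have : x ∈ (enemies.filter (capb pos)).map (gF enemies) := by rw [hl]; simp
          obtain ⟨e, _, rfl⟩ := List.mem_map.mp this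
          exact g_nonneg _ _
        rw [show max (-1 : Int) x = x by omega]

lemma diff_singleton (rem : List (List Int)) (e : List Int) :
    PySem.Set.diff rem [e] = rem.filter (fun j => j != e) := by
  simp only [PySem.Set.diff]
  apply List.filter_congr
  intro a _
  simp [bne, beq_eq_decide]

lemma max_eq_if (best v : Int) : (if v > best then v else best) = max best v := by
  rw [max_def]; split_ifs <;> omega

def InvM (memo : PySem.Dict ((Int × Int) × List (List Int)) Int) : Prop :=
  ∀ pos rem v, memo.get? (pos, rem) = some v → v = g pos rem

lemma goLoop_ok (f : Nat)
    (IH : ∀ pos rem memo, rem.length < f → InvM memo →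
      (goB f pos rem memo).1 = g pos rem ∧ InvM (goB f pos rem memo).2) :
    ∀ (todo rem : List (List Int)) (pos : Int × Int) (best : Int) memo,
      todo ⊆ rem → rem.length ≤ f → InvM memo →
      (goLoop (fun p rm m => goB f p rm m) pos rem todo best memo).1
          = ((todo.filter (capb pos)).map (gF rem)).foldl max best
        ∧ InvM (goLoop (fun p rm m => goB f p rm m) pos rem todo best memo).2 := by
  intro todo
  induction todo with
  | nil => intro rem pos best memo _ _ hmem; simp [goLoop, hmem]
  | cons e t iht =>
    intro rem pos best memo hsub hlen hmem
    have het : e ∈ rem := hsub List.mem_cons_self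
    have htsub : t ⊆ rem := fun x hx => hsub (List.mem_cons_of_mem _ hx)
    by_cases hc : capb pos e
    · have hlt : (rem.filter (fun j => j != e)).length < f :=
        lt_of_lt_of_le (filter_ne_length_lt het) hlen
      have hB := IH (PySem.List.pyGetD e 0 0, PySem.List.pyGetD e 1 0)
        (rem.filter (fun j => j != e)) memo (by simpa [diff_singleton] using hlt) hmem
      have ceq : (pos.1 == PySem.List.pyGetD e 0 0 || pos.2 == PySem.List.pyGetD e 1 0) = capb pos e := rfl
      rw [goLoop, ceq, hc, if_pos rfl]
      simp only [diff_singleton]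
      have hiht := iht rem pos
        (max best ((goB f (PySem.List.pyGetD e 0 0, PySem.List.pyGetD e 1 0) (rem.filter (fun j => j != e)) memo).1))
        ((goB f (PySem.List.pyGetD e 0 0, PySem.List.pyGetD e 1 0) (rem.filter (fun j => j != e)) memo).2)
        htsub hlen hB.2
      have hfc : (e :: t).filter (capb pos) = e :: t.filter (capb pos) := by
        simp [hc]
      rw [max_eq_if]
      refine ⟨?_, hiht.2⟩
      rw [hiht.1, hB.1, hfc]
      simp only [List.map_cons, List.foldl_cons, gF]
    · have ceq : (pos.1 == PySem.List.pyGetD e 0 0 || pos.2 == PySem.List.pyGetD e 1 0) = capb pos e := rfl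
      have hcf : capb pos e = false := by simpa using hc
      rw [goLoop, ceq, hcf, if_neg (by simp)]
      have := iht rem pos best memo htsub hlen hmem
      rw [this.1]
      refine ⟨?_, this.2⟩
      have hfc : (e :: t).filter (capb pos) = t.filter (capb pos) := by
        simp [hcf]
      rw [hfc]

lemma goB_ok : ∀ (fuel : Nat) (pos : Int × Int) (rem : List (List Int)) memo,
    rem.length < fuel → InvM memo →
    (goB fuel pos rem memo).1 = g pos rem ∧ InvM (goB fuel pos rem memo).2 := by
  intro fuel
  induction fuel with
  | zero => intro pos rem memo h; omega
  | succ f ihf =>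
    intro pos rem memo hlen hmem
    rw [goB]
    rcases hg : memo.get? (pos, rem) with _ | v
    · simp only
      have hloop := goLoop_ok f ihf rem rem pos (-1) memo (fun x hx => hx)
        (by omega) hmem
      have hval : (goLoop (fun p rm m => goB f p rm m) pos rem rem (-1) memo).1 + 1 = g pos rem := by
        rw [hloop.1, g_unfold]; omega
      constructor
      · exact hval
      · intro pos' rem' v hv
        rw [PySem.Dict.get?_insert] at hv
        split at hv
        · rename_i hk
          rw [Prod.ext_iff] at hk
          obtain ⟨h1, h2⟩ := hk
          injection hv with hv
          subst h1; subst h2; subst hv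
          exact hval
        · exact hloop.2 pos' rem' v hv
    · simp only
      exact ⟨hmem pos rem v hg, hmem⟩

lemma ofList_mem_iff (enemies : List (List Int)) :
    ∀ x, x ∈ PySem.Set.ofList enemies ↔ x ∈ enemies := by
  intro x; exact PySem.Set.mem_ofList enemies x

theorem pv_equal : ∀ (berserker : List Int) (enemies : List (List Int)),
    berserk_rook berserker enemies = berserk_rook_alt berserker enemies := by
  intro berserker enemies
  rw [A_eq_g_aux enemies.length enemies berserker le_rfl]
  rw [berserk_rook_alt]
  have hlen : (PySem.Set.ofList enemies).length < enemies.length + 1 :=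
    Nat.lt_succ_of_le (PySem.Set.length_ofList_le enemies)
  have hinv : InvM PySem.Dict.empty := by
    intro pos rem v hv
    rw [PySem.Dict.get?_empty] at hv
    cases hv
  rw [(goB_ok (enemies.length + 1)
      (PySem.List.pyGetD berserker 0 0, PySem.List.pyGetD berserker 1 0)
      (PySem.Set.ofList enemies) PySem.Dict.empty hlen hinv).1]
  exact g_congr _ (fun x => (ofList_mem_iff enemies x).symm)

-- ===== VERDICT (by name: the statement is the Claim_ definition above) =====
theorem berserk_rook_spec : Claim_equal_berserk_rook := by
  intro berserker enemies _ _
  exact pv_equal berserker enemies
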